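-- pv_equiv track=rewrite | github.com/HoangDung05/PTIT | python/codePtit/PY01039_Kiemtrasodep.py | check
-- ===== SOURCE A (Python) =====
-- def check(n):
--     a = n[0]
--     b = n[1]
--     for i in range(len(n)):
--         if i % 2 == 0 and n[i] != a:
--             return False
--         if i % 2 != 0 and n[i] != b:
--             return False
--     return True
-- ===== SOURCE B (Python) =====
-- def check(n):
--     a = n[0]
--     b = n[1]
--     return all(x == a for x in n[::2]) and all(x == b for x in n[1::2])
-- ===== Notes on version B (the rewrite author's own statement) =====
-- stated objective: simpler
-- what changed: Replaces the single indexed loop with a parity branch by two separate strided slices n[::2] and n[1::2], each checked for constancy against a and b.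
import Mathlib
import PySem

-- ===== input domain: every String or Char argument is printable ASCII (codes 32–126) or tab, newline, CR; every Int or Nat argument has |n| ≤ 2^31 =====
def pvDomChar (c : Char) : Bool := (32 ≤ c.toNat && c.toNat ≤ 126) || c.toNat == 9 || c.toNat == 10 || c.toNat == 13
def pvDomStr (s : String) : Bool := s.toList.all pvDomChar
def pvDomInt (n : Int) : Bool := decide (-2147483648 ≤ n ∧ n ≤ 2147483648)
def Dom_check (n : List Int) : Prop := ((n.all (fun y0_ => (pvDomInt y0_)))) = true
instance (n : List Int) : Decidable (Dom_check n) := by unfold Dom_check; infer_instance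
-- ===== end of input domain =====

-- B replaces A's single indexed loop with a parity branch by two strided slices checked separately (objective: simpler).

-- ===== PORT A =====
-- the 'for i in range(len(n))' loop with its two early returns
def checkGo (n : List Int) (a b : Int) : List Int → Bool
  | [] => true
  | i :: rest =>
    match PySem.List.pyGet? n i with
    | none => false   -- IndexError (unreachable: i comes from range(len(n)))
    | some v =>
      if PySem.Int.mod i 2 == 0 && v != a then false
      else if PySem.Int.mod i 2 != 0 && v != b then false
      else checkGo n a b rest

def check (n : List Int) : Bool :=
  match PySem.List.pyGet? n 0, PySem.List.pyGet? n 1 with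
  | some a, some b => checkGo n a b (PySem.List.pyRange 0 n.length 1)
  | _, _ => false   -- IndexError on n[0]/n[1] (excluded by Pre_check)

-- ===== PORT B =====
def check_alt (n : List Int) : Bool :=
  match PySem.List.pyGet? n 0 with
  | none => false   -- IndexError on n[0] (excluded by Pre_check)
  | some a =>
    match PySem.List.pyGet? n 1 with
    | none => false   -- IndexError on n[1] (excluded by Pre_check)
    | some b =>
      ((PySem.List.slice? n none none 2).getD []).all (fun x => x == a) &&
      ((PySem.List.slice? n (some 1) none 2).getD []).all (fun x => x == b)

-- ===== PRECONDITION & SPEC =====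
-- A raises IndexError on lists of length < 2 (the unconditional reads n[0], n[1]); those are excluded.
def Pre_check (n : List Int) : Prop := 2 ≤ n.length
instance (n : List Int) : Decidable (Pre_check n) := by unfold Pre_check; infer_instance
def pvWitness_check : List Int := [5, 7, 5, 7]
def Spec_check (n : List Int) (out : Bool) : Prop := out = check_alt n
instance (n : List Int) (out : Bool) : Decidable (Spec_check n out) := by unfold Spec_check; infer_instance

-- ===== CLAIM (what is proved, stated in full; the proofs are below) =====
def Claim_equal_check : Prop := ∀ (n : List Int), Dom_check n → Pre_check n → Spec_check n (check n)

-- ===== LEMMAS AND PROOFS =====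

-- elements at even positions
def evens : List Int → List Int
  | [] => []
  | [x] => [x]
  | x :: _ :: r => x :: evens r

-- elements at odd positions
def odds : List Int → List Int
  | [] => []
  | [_] => []
  | _ :: y :: r => y :: odds r

theorem eo_cons : ∀ (t : List Int) (x : Int), evens (x :: t) = x :: odds t ∧ odds (x :: t) = evens t := by
  intro t
  induction t with
  | nil => intro x; exact ⟨rfl, rfl⟩
  | cons y r ih =>
    intro x
    refine ⟨?_, ?_⟩
    · rw [(ih y).2]; simp [evens]
    · rw [(ih y).1]; simp [odds]

theorem evens_cons (x : Int) (t : List Int) : evens (x :: t) = x :: odds t :=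
  (eo_cons t x).1

theorem odds_cons (x : Int) (t : List Int) : odds (x :: t) = evens t :=
  (eo_cons t x).2

theorem filterMap_even (xs : List Int) :
    List.filterMap (fun k => xs[2*k]?) (List.range ((xs.length+1)/2)) = evens xs := by
  induction xs using evens.induct with
  | case1 => rfl
  | case2 x => simp [evens]
  | case3 x y r ih =>
    have hlen : ((x :: y :: r).length + 1) / 2 = (r.length + 1) / 2 + 1 := by
      simp [List.length_cons]; omega
    rw [hlen, List.range_succ_eq_map, List.filterMap_cons, List.filterMap_map]
    simp only [Function.comp]
    have : (fun k => (x :: y :: r)[2*(k+1)]?) = (fun k => r[2*k]?) := by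
      funext k
      have h2 : 2*(k+1) = 2*k+2 := by omega
      rw [h2]
      simp
    simp only [Nat.mul_zero, List.getElem?_cons_zero]
    rw [show (fun a => (x :: y :: r)[2 * (a + 1)]?) = (fun k => r[2*k]?) from this, ih]
    rfl

theorem slice?_even (xs : List Int) :
    PySem.List.slice? xs none none 2 = some (evens xs) := by
  simp only [PySem.List.slice?, PySem.List.sliceIndices]
  norm_num
  rw [show (fun k : Nat => xs[(2 * (k:Int)).toNat]?) = (fun k => xs[2*k]?) by
    funext k; rw [show ((2:Int) * (k:Int)).toNat = 2*k by omega]]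
  rw [show (if 0 < xs.length then (((xs.length:Int) + 2 - 1) / 2).toNat else 0)
        = (xs.length + 1) / 2 by split <;> omega]
  exact filterMap_even xs

theorem slice?_odd (x : Int) (t : List Int) :
    PySem.List.slice? (x :: t) (some 1) none 2 = some (evens t) := by
  simp only [PySem.List.slice?, PySem.List.sliceIndices]
  norm_num
  rw [show (fun k : Nat => (x :: t)[(1 + 2 * (k:Int)).toNat]?) = (fun k => t[2*k]?) by
    funext k
    rw [show ((1:Int) + 2 * (k:Int)).toNat = 2*k+1 by omega]
    simp]
  rw [show (if 0 < t.length then (((t.length:Int) + 2 - 1) / 2).toNat else 0)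
        = (t.length + 1) / 2 by split <;> omega]
  exact filterMap_even t

theorem mod_two_nat (j : Nat) : PySem.Int.mod (j : Int) 2 = ((j % 2 : Nat) : Int) := by
  exact_mod_cast PySem.Int.mod_natCast j 2

theorem loopA (n : List Int) (a b : Int) :
    ∀ m j : Nat, n.length ≤ j + m →
    checkGo n a b (PySem.List.pyRange (j:Int) n.length 1) =
      ((evens (n.drop j)).all (fun x => x == (if j % 2 = 0 then a else b)) &&
       (odds (n.drop j)).all (fun x => x == (if j % 2 = 0 then b else a))) := by
  intro m
  induction m with
  | zero =>
    intro j hj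
    rw [PySem.List.pyRange_one_eq_nil (by exact_mod_cast hj)]
    rw [List.drop_of_length_le (by omega)]
    simp [checkGo, evens, odds]
  | succ m ih =>
    intro j hj
    by_cases hjl : j < n.length
    · rw [PySem.List.pyRange_one_cons (by exact_mod_cast hjl)]
      have hget : PySem.List.pyGet? n (j:Int) = some n[j] := by
        rw [PySem.List.pyGet?_natCast]
        simp [List.getElem?_eq_getElem hjl]
      simp only [checkGo, hget]
      have hdrop : n.drop j = n[j] :: n.drop (j+1) := List.drop_eq_getElem_cons hjl
      have hrest : checkGo n a b (PySem.List.pyRange ((j:Int)+1) n.length 1) =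
          ((evens (n.drop (j+1))).all (fun x => x == (if (j+1) % 2 = 0 then a else b)) &&
           (odds (n.drop (j+1))).all (fun x => x == (if (j+1) % 2 = 0 then b else a))) := by
        rw [show ((j:Int)+1) = (((j+1 : Nat)):Int) by push_cast; ring]
        exact ih (j+1) (by omega)
      rw [hdrop, evens_cons, odds_cons, mod_two_nat]
      rcases Nat.even_or_odd j with he | ho
      · have h2 : j % 2 = 0 := Nat.even_iff.mp he
        have h3 : (j+1) % 2 = 1 := by omega
        simp only [h2, h3] at *
        by_cases hv : n[j] = a
        · simp [hv, hrest, Bool.and_comm]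
        · simp [bne_iff_ne, Ne, hv]
      · have h2 : j % 2 = 1 := Nat.odd_iff.mp ho
        have h3 : (j+1) % 2 = 0 := by omega
        simp only [h2, h3] at *
        by_cases hv : n[j] = b
        · simp [hv, hrest, Bool.and_comm]
        · simp [bne_iff_ne, Ne, hv]
    · rw [PySem.List.pyRange_one_eq_nil (by exact_mod_cast (by omega : n.length ≤ j))]
      rw [List.drop_of_length_le (by omega)]
      simp [checkGo, evens, odds]

-- ===== VERDICT (by name: the statement is the Claim_ definition above) =====
theorem check_spec : Claim_equal_check := by
  intro n _ hpre
  unfold Spec_check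
  rcases n with _ | ⟨x, t⟩
  · simp [Pre_check] at hpre
  · have hx : PySem.List.pyGet? (x :: t) 0 = some x := PySem.List.pyGet?_zero_cons x t
    have h1lt : (1:Nat) < (x :: t).length := by
      simp [List.length_cons]; unfold Pre_check at hpre; simp [List.length_cons] at hpre; omega
    have hy : PySem.List.pyGet? (x :: t) 1 = some (x :: t)[1] := by
      rw [show (1:Int) = ((1:Nat):Int) by norm_num, PySem.List.pyGet?_natCast]
      simp [List.getElem?_eq_getElem h1lt]
    simp only [check, check_alt, hx, hy]
    rw [slice?_even, slice?_odd]
    rw [show (0:Int) = ((0:Nat):Int) by norm_num]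
    rw [loopA (x :: t) x ((x :: t)[1]) (x :: t).length 0 (by omega)]
    simp only [Nat.zero_mod, List.drop_zero]
    simp [evens_cons, odds_cons]
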